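-- pv_equiv track=rewrite | github.com/J-Pesos/GSEnumeration | Magana/Enumeration_v2.py | add_generation_depth
-- ===== SOURCE A (Python) =====
-- def add_generation_depth(path): ###Counts and lists the generation difference between two individuals defined by the relation local variable.
--     depth = 0
--     for edge in path:
--         if edge == 'p':
--             depth += 1
--         elif edge == 'c':
--             depth -= 1
--     return depth
-- ===== SOURCE B (Python) =====
-- def add_generation_depth(path):
--     counts = {}
--     for edge in path:
--         counts[edge] = counts.get(edge, 0) + 1
--     return counts.get('p', 0) - counts.get('c', 0)
-- ===== Notes on version B (the rewrite author's own statement) =====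
-- stated objective: alternative
-- what changed: Replaces the running branch-and-accumulate net counter with a frequency table built once over the path, returning counts['p'] - counts['c'] from two lookups.
import Mathlib
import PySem

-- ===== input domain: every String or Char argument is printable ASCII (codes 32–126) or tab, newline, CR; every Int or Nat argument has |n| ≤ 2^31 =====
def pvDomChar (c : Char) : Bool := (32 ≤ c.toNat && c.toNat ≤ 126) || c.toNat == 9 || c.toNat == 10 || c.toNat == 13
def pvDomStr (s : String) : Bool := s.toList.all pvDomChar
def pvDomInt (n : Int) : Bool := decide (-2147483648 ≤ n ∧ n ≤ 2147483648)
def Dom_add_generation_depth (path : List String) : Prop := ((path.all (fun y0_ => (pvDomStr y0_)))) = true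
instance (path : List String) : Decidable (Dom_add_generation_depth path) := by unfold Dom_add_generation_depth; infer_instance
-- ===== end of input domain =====

-- B replaces A's running net counter with a frequency table built over the path plus two lookups (alternative decomposition, same cost).


-- ===== PORT A =====
def add_generation_depth (path : List String) : Int :=
  path.foldl (fun depth edge =>
    if edge == "p" then depth + 1
    else if edge == "c" then depth - 1
    else depth) 0

-- ===== PORT B =====
def add_generation_depth_alt (path : List String) : Int :=
  let counts := path.foldl (fun d edge => d.insert edge (d.getD edge 0 + 1)) PySem.Dict.empty
  counts.getD "p" 0 - counts.getD "c" 0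

-- ===== PRECONDITION & SPEC =====
def Spec_add_generation_depth (path : List String) (out : Int) : Prop := out = add_generation_depth_alt path
instance (path : List String) (out : Int) : Decidable (Spec_add_generation_depth path out) := by unfold Spec_add_generation_depth; infer_instance

-- ===== CLAIM (what is proved, stated in full; the proofs are below) =====
def Claim_equal_add_generation_depth : Prop := ∀ (path : List String), Dom_add_generation_depth path → Spec_add_generation_depth path (add_generation_depth path)

-- ===== LEMMAS AND PROOFS =====
-- B's frequency-table fold: the count stored at key k is the initial value plus
-- the number of occurrences of k in the path.
theorem agd_counter_getD (path : List String) (d : PySem.Dict String Int) (k : String) :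
    (path.foldl (fun d edge => d.insert edge (d.getD edge 0 + 1)) d).getD k 0
      = d.getD k 0 + (path.count k : Int) := by
  induction path generalizing d with
  | nil => simp
  | cons e rest ih =>
    simp only [List.foldl_cons, ih, PySem.Dict.getD_insert, List.count_cons]
    by_cases h : k = e
    · subst h; simp; ring
    · have h' : (e == k) = false := by simp [Ne.symm h]
      simp [h, h']

-- A's running counter equals count "p" minus count "c".
theorem agd_loopA (path : List String) (depth : Int) :
    path.foldl (fun depth edge =>
      if edge == "p" then depth + 1
      else if edge == "c" then depth - 1
      else depth) depth
    = depth + (path.count "p" : Int) - (path.count "c" : Int) := by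
  induction path generalizing depth with
  | nil => simp
  | cons e rest ih =>
    simp only [List.foldl_cons, ih, List.count_cons]
    by_cases hp : e = "p"
    · subst hp; simp; ring
    · by_cases hc : e = "c"
      · subst hc; simp [hp]; ring
      · simp [hp, hc, Ne.symm hp, Ne.symm hc]

-- ===== VERDICT (by name: the statement is the Claim_ definition above) =====
theorem add_generation_depth_spec : Claim_equal_add_generation_depth := by
  intro path _
  unfold Spec_add_generation_depth add_generation_depth add_generation_depth_alt
  simp only [agd_loopA, agd_counter_getD]
  simp [PySem.Dict.getD, PySem.Dict.get?, PySem.Dict.empty]
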